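-- pv_equiv track=rewrite | github.com/issdandavis/aws-lambda-simple-web-app | tests/enterprise/ai_safety/test_adversarial_prompts.py | _has_repetitive_pattern
-- ===== SOURCE A (Python) =====
-- def _has_repetitive_pattern(text: str) -> bool:
--     """Check for suspicious repetitive patterns."""
--     if len(text) < 100:
--         return False
--
--     # Check if any 10-char substring repeats more than 50 times
--     for i in range(len(text) - 10):
--         pattern = text[i:i+10]
--         if text.count(pattern) > 50:
--             return True
--
--     return False
-- ===== SOURCE B (Python) =====
-- def _has_repetitive_pattern(text: str) -> bool:
--     """Check for suspicious repetitive patterns (single-pass 10-gram index)."""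
--     n = len(text)
--     if n < 100:
--         return False
--     positions = {}
--     for i in range(n - 9):
--         positions.setdefault(text[i:i+10], []).append(i)
--     for pos_list in positions.values():
--         cnt = 0
--         nxt = 0
--         for i in pos_list:
--             if i >= nxt:
--                 cnt += 1
--                 nxt = i + 10
--         if cnt > 50:
--             return True
--     return False
-- ===== Notes on version B (the rewrite author's own statement) =====
-- stated objective: faster
-- what changed: A re-runs text.count (an O(n) scan) for every window start; B makes one pass indexing each 10-gram's start positions in a dict and then does a greedy non-overlapping count per distinct pattern.
import Mathlib
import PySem

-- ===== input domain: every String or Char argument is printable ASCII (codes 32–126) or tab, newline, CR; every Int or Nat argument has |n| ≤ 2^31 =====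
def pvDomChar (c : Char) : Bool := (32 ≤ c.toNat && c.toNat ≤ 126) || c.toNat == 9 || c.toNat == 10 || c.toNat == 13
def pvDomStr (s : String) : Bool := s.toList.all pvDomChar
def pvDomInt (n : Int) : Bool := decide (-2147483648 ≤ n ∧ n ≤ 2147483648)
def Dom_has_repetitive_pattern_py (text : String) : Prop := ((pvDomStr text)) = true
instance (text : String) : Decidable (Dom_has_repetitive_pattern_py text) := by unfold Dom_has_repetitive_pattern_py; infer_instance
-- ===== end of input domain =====

-- B replaces A's quadratic scan (text.count re-run for every window start) by one pass that
-- indexes the positions of every 10-gram in a dict and then counts greedily, non-overlapping,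
-- per distinct pattern; objective: faster.

-- ===== PORT A =====
def has_repetitive_pattern_py (text : String) : Bool :=
  if PySem.Str.len text < 100 then false
  else
    (PySem.List.pyRange 0 (PySem.Str.len text - 10)).any (fun i =>
      let pattern := PySem.Str.slice text (some i) (some (i + 10))
      decide (50 < PySem.Str.count text pattern))

-- ===== PORT B =====
-- the inner 'cnt/nxt' greedy loop of Source B over one position list
def pvGreedy (ps : List Int) : Int :=
  (ps.foldl (fun st i => if st.2 ≤ i then (st.1 + 1, i + 10) else st) ((0 : Int), (0 : Int))).1

def has_repetitive_pattern_py_alt (text : String) : Bool :=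
  if PySem.Str.len text < 100 then false
  else
    let positions := (PySem.List.pyRange 0 (PySem.Str.len text - 9)).foldl
      (fun d i => d.modify (PySem.Str.slice text (some i) (some (i + 10))) [] (fun l => l ++ [i]))
      PySem.Dict.empty
    positions.values.any (fun ps => decide (50 < pvGreedy ps))
-- ===== PRECONDITION & SPEC =====
def Spec_has_repetitive_pattern_py (text : String) (out : Bool) : Prop := out = has_repetitive_pattern_py_alt text
instance (text : String) (out : Bool) : Decidable (Spec_has_repetitive_pattern_py text out) := by unfold Spec_has_repetitive_pattern_py; infer_instance

-- ===== CLAIM (what is proved, stated in full; the proofs are below) =====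
def Claim_equal_has_repetitive_pattern_py : Prop := ∀ (text : String), Dom_has_repetitive_pattern_py text → Spec_has_repetitive_pattern_py text (has_repetitive_pattern_py text)

-- ===== LEMMAS AND PROOFS =====

def pvAux (s : Nat) : Nat → List Nat → Nat
  | _, [] => 0
  | nxt, i :: t => if nxt ≤ i then 1 + pvAux s (i + s) t else pvAux s nxt t

theorem pvAux_le_length (s : Nat) : ∀ (ps : List Nat) (nxt : Nat), pvAux s nxt ps ≤ ps.length := by
  intro ps
  induction ps with
  | nil => intro nxt; simp [pvAux]
  | cons i t ih =>
    intro nxt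
    simp only [pvAux, List.length_cons]
    split
    · have := ih (i + s); omega
    · have := ih nxt; omega

theorem pvAux_shift (s k : Nat) : ∀ (ps : List Nat) (nxt : Nat),
    pvAux s (nxt + k) (ps.map (· + k)) = pvAux s nxt ps := by
  intro ps
  induction ps with
  | nil => intro nxt; simp [pvAux]
  | cons i t ih =>
    intro nxt
    simp only [List.map_cons, pvAux]
    by_cases h : nxt ≤ i
    · rw [if_pos (by omega), if_pos h]
      have : i + k + s = i + s + k := by omega
      rw [this, ih (i + s)]
    · rw [if_neg (by omega), if_neg h, ih nxt]

theorem pvAux_low (s : Nat) : ∀ (low hi : List Nat) (nxt : Nat), (∀ i ∈ low, i < nxt) →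
    pvAux s nxt (low ++ hi) = pvAux s nxt hi := by
  intro low
  induction low with
  | nil => intro hi nxt _; simp
  | cons i t ih =>
    intro hi nxt h
    have hi' : i < nxt := h i (by simp)
    simp only [List.cons_append, pvAux]
    rw [if_neg (by omega), ih hi nxt (fun j hj => h j (by simp [hj]))]

theorem pvAux_congr_start (s : Nat) : ∀ (ps : List Nat) (a b : Nat),
    (∀ i ∈ ps, (a ≤ i ↔ b ≤ i)) → pvAux s a ps = pvAux s b ps := by
  intro ps
  induction ps with
  | nil => intro a b _; simp [pvAux]
  | cons i t ih =>
    intro a b h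
    have hi := h i (by simp)
    simp only [pvAux]
    by_cases ha : a ≤ i
    · rw [if_pos ha, if_pos (hi.mp ha)]
    · rw [if_neg ha, if_neg (fun hb => ha (hi.mpr hb)), ih a b (fun j hj => h j (by simp [hj]))]


def pvMpos (L g : List Char) : List Nat :=
  (List.range L.length).filter (fun i => g.isPrefixOf (L.drop i))

theorem pvMpos_split (L g : List Char) (k : Nat) (hk : k ≤ L.length) :
    pvMpos L g = ((List.range k).filter (fun i => g.isPrefixOf (L.drop i)))
      ++ (pvMpos (L.drop k) g).map (· + k) := by
  unfold pvMpos
  have h1 : L.length = k + (L.length - k) := by omega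
  rw [h1, List.range_add, List.filter_append, List.length_drop]
  congr 1
  rw [List.filter_map]
  have hmap : ∀ xs : List Nat, xs.map (fun x => k + x) = xs.map (· + k) := by
    intro xs; apply List.map_congr_left; intro x _; omega
  rw [← hmap]
  congr 1
  apply List.filter_congr
  intro i _
  simp only [Function.comp_apply, List.drop_drop]

def pvCnt (g : List Char) (l : List Char) : Nat :=
  if h : g ≠ [] ∧ g.isPrefixOf l then 1 + pvCnt g (l.drop g.length)
  else match l with
    | [] => 0
    | _ :: t => pvCnt g t
termination_by l.length
decreasing_by
  · have h1 : g <+: l := by simpa using h.2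
    have h2 : g.length ≤ l.length := h1.length_le
    have h3 : 0 < g.length := List.length_pos_iff.mpr h.1
    simp only [List.length_drop]; omega
  · simp

theorem pvCnt_eq_aux (g : List Char) (hg : g ≠ []) :
    ∀ (N : Nat) (L : List Char), L.length ≤ N → pvAux g.length 0 (pvMpos L g) = pvCnt g L := by
  intro N
  induction N with
  | zero =>
    intro L hL
    have : L = [] := List.length_eq_zero_iff.mp (by omega)
    subst this
    rw [pvCnt]
    simp [pvMpos, pvAux, hg]
  | succ N ih =>
    intro L hL
    have hgl : 0 < g.length := List.length_pos_iff.mpr hg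
    by_cases hp : g.isPrefixOf L
    · -- prefix at 0
      have hpre : g <+: L := by simpa using hp
      have hlen : g.length ≤ L.length := hpre.length_le
      rw [pvMpos_split L g g.length hlen]
      -- low part starts with 0
      have hs : g.length = (g.length - 1) + 1 := by omega
      rw [hs, List.range_succ_eq_map, ← hs]
      simp only [List.filter_cons, List.drop_zero, hp, if_true]
      simp only [List.cons_append, pvAux, if_pos (Nat.le_refl 0)]
      have hlow : ∀ i ∈ (List.map Nat.succ (List.range (g.length - 1))).filter
          (fun i => g.isPrefixOf (L.drop i)), i < 0 + g.length := by
        intro i hi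
        have := List.mem_of_mem_filter hi
        simp only [List.mem_map, List.mem_range] at this
        obtain ⟨j, hj, rfl⟩ := this
        omega
      rw [pvAux_low _ _ _ _ hlow, pvAux_shift]
      have hrec := ih (L.drop g.length) (by simp [List.length_drop]; omega)
      rw [hrec]
      conv_rhs => rw [pvCnt]
      rw [dif_pos ⟨hg, hp⟩]
    · cases L with
      | nil =>
        rw [pvCnt]
        simp [pvMpos, pvAux, hg]
      | cons c t =>
        rw [pvMpos_split (c :: t) g 1 (by simp)]
        have hpf : g.isPrefixOf (c :: t) = false := eq_false_of_ne_true hp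
        rw [show List.range 1 = [0] from rfl]
        simp only [List.filter_cons, List.drop_zero, hpf, if_false, Bool.false_eq_true]
        simp only [List.filter_nil, List.nil_append, List.drop_one, List.tail_cons]
        rw [pvAux_congr_start g.length _ 0 1 (by
          intro i hi
          simp only [List.mem_map] at hi
          obtain ⟨j, _, rfl⟩ := hi
          omega)]
        have : (0 : Nat) + 1 = 1 := rfl
        rw [← this, pvAux_shift]
        have hrec := ih t (by simp at hL ⊢; omega)
        rw [hrec]
        conv_rhs => rw [pvCnt]
        rw [dif_neg (by intro hc; exact hp hc.2)]

theorem pvGo_eq (g : List Char) (hg : g ≠ []) :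
    ∀ (fuel : Nat) (L : List Char) (acc : Nat), L.length ≤ fuel →
      PySem.Chars.count.go g fuel L acc = acc + pvCnt g L := by
  intro fuel
  induction fuel with
  | zero =>
    intro L acc hL
    have : L = [] := List.length_eq_zero_iff.mp (by omega)
    subst this
    rw [pvCnt]
    simp [PySem.Chars.count.go, hg]
  | succ n ih =>
    intro L acc hL
    cases L with
    | nil =>
      rw [pvCnt]
      simp [PySem.Chars.count.go, hg]
    | cons c t =>
      have hgl : 0 < g.length := List.length_pos_iff.mpr hg
      rw [PySem.Chars.count.go]
      by_cases hp : g.isPrefixOf (c :: t)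
      · rw [if_pos hp, ih _ _ (by simp only [List.length_cons] at hL; simp only [List.length_drop, List.length_cons]; omega)]
        conv_rhs => rw [pvCnt]
        rw [dif_pos ⟨hg, hp⟩]
        omega
      · rw [if_neg hp, ih _ _ (by simp at hL ⊢; omega)]
        conv_rhs => rw [pvCnt]
        rw [dif_neg (by intro hc; exact hp hc.2)]

theorem pvCount_eq_cnt (g L : List Char) (hg : g ≠ []) :
    PySem.Chars.count L g = pvCnt g L := by
  unfold PySem.Chars.count
  rw [if_neg (by simp [hg]), pvGo_eq g hg L.length L 0 (Nat.le_refl _)]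
  omega

theorem pvSlice_toList (text : String) (j : Nat) :
    (PySem.Str.slice text (some (j:Int)) (some ((j:Int) + 10))).toList
      = (text.toList.drop j).take 10 := by
  rw [PySem.Str.toList_slice, PySem.Chars.slice_eq_listSlice]
  have h : ((j:Int) + 10) = ((j + 10 : Nat) : Int) := by push_cast; ring
  rw [h, PySem.List.slice_natCast]
  congr 1
  omega

theorem pvGreedy_cast : ∀ (ps : List Nat) (c : Int) (nxt : Nat),
    ((ps.map Int.ofNat).foldl
      (fun st i => if st.2 ≤ i then (st.1 + 1, i + 10) else st) (c, (nxt : Int))).1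
      = c + (pvAux 10 nxt ps : Int) := by
  intro ps
  induction ps with
  | nil => intro c nxt; simp [pvAux]
  | cons i t ih =>
    intro c nxt
    rw [List.map_cons, List.foldl_cons]
    by_cases h : nxt ≤ i
    · rw [if_pos (show (c, (nxt : Int)).2 ≤ Int.ofNat i from Int.ofNat_le.mpr h)]
      have heq : ((c, (nxt : Int)).1 + 1, Int.ofNat i + 10) = (c + 1, ((i + 10 : Nat) : Int)) := by
        simp only [Prod.mk.injEq]
        refine ⟨trivial, ?_⟩
        rw [show Int.ofNat i = (i : Int) from rfl]
        push_cast; ring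
      rw [heq, ih (c + 1) (i + 10), pvAux, if_pos h]
      push_cast; ring
    · rw [if_neg (show ¬ (c, (nxt : Int)).2 ≤ Int.ofNat i from fun hh => h (Int.ofNat_le.mp hh)),
        ih c nxt, pvAux, if_neg h]

theorem pvA_char (text : String) (h100 : 100 ≤ text.toList.length) :
    has_repetitive_pattern_py text = true ↔
      ∃ j, j < text.toList.length - 10 ∧
        50 < PySem.Chars.count text.toList ((text.toList.drop j).take 10) := by
  unfold has_repetitive_pattern_py
  rw [PySem.Str.len_eq, if_neg (by omega)]
  have hsub : (text.toList.length : Int) - 10 = ((text.toList.length - 10 : Nat) : Int) := by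
    omega
  rw [hsub, PySem.List.pyRange_zero_natCast, List.any_map, List.any_eq_true]
  simp only [Function.comp_apply, PySem.Str.count_eq, decide_eq_true_eq, List.mem_range,
    pvSlice_toList]

theorem pvGreedy_natlist (ps : List Nat) : pvGreedy (ps.map Int.ofNat) = (pvAux 10 0 ps : Int) := by
  unfold pvGreedy
  have h := pvGreedy_cast ps 0 0
  simpa using h

theorem pvShortpos_nil (M g : List Char) (hlen : M.length < g.length) :
    pvMpos M g = [] := by
  unfold pvMpos
  rw [List.filter_eq_nil_iff]
  intro i hi hpf
  have hpre : g <+: M.drop i := by simpa using hpf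
  have := hpre.length_le
  simp only [List.length_drop] at this
  omega

theorem pvNatpos_eq (text : String) (h100 : 100 ≤ text.toList.length) (j : Nat)
    (hj : j < text.toList.length - 9) :
    (List.range (text.toList.length - 9)).filter
      (fun (k : Nat) => PySem.Str.slice text (some (k : Int)) (some ((k : Int) + 10))
        == PySem.Str.slice text (some (j : Int)) (some ((j : Int) + 10)))
    = pvMpos text.toList ((text.toList.drop j).take 10) := by
  have hglen : ((text.toList.drop j).take 10).length = 10 := by
    simp only [List.length_take, List.length_drop]
    omega
  have hpt : ∀ k ∈ List.range (text.toList.length - 9),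
      (PySem.Str.slice text (some (k : Int)) (some ((k : Int) + 10))
        == PySem.Str.slice text (some (j : Int)) (some ((j : Int) + 10)))
      = ((text.toList.drop j).take 10).isPrefixOf (text.toList.drop k) := by
    intro k _
    rw [Bool.eq_iff_iff, beq_iff_eq, ← String.toList_inj, pvSlice_toList, pvSlice_toList,
      List.isPrefixOf_iff_prefix]
    constructor
    · intro h
      rw [← h]
      exact List.take_prefix _ _
    · intro h
      have := List.prefix_iff_eq_take.mp h
      rw [this, hglen]
  rw [List.filter_congr hpt]
  rw [pvMpos_split text.toList _ (text.toList.length - 9) (by omega)]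
  rw [pvShortpos_nil _ _ (by simp only [List.length_drop]; omega)]
  simp

theorem pvB_char (text : String) (h100 : 100 ≤ text.toList.length) :
    has_repetitive_pattern_py_alt text = true ↔
      ∃ j, j < text.toList.length - 9 ∧
        50 < pvAux 10 0 (pvMpos text.toList ((text.toList.drop j).take 10)) := by
  unfold has_repetitive_pattern_py_alt
  rw [PySem.Str.len_eq, if_neg (by omega)]
  have hsub : (text.toList.length : Int) - 9 = ((text.toList.length - 9 : Nat) : Int) := by omega
  rw [hsub, PySem.List.pyRange_zero_natCast, List.foldl_map]
  have hfold : (List.range (text.toList.length - 9)).foldl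
      (fun (d : PySem.Dict String (List Int)) (k : Nat) =>
        d.modify (PySem.Str.slice text (some (k : Int)) (some ((k : Int) + 10))) []
          (fun l => l ++ [(k : Int)])) PySem.Dict.empty
    = ((List.range (text.toList.length - 9)).map
        (fun (k : Nat) =>
          (PySem.Str.slice text (some (k : Int)) (some ((k : Int) + 10)), (k : Int)))).foldl
        (fun d p => d.modify p.1 [] (fun l => l ++ [p.2])) PySem.Dict.empty := by
    rw [List.foldl_map]
  rw [hfold]
  have hnodup : (((List.range (text.toList.length - 9)).map
      (fun (k : Nat) =>
        (PySem.Str.slice text (some (k : Int)) (some ((k : Int) + 10)), (k : Int)))).foldl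
      (fun d p => d.modify p.1 [] (fun l => l ++ [p.2])) PySem.Dict.empty).keys.Nodup := by
    exact PySem.Dict.nodup_keys_foldl_modify_key _ (fun (p : String × Int) => p.1)
      ([] : List Int)
      (fun (d : PySem.Dict String (List Int)) (p : String × Int) => fun l => l ++ [p.2]) _
      (by simp [PySem.Dict.keys_empty])
  simp only [PySem.Dict.values_eq_map_keys _ hnodup [], List.any_map, List.any_eq_true]
  have hkeys : (((List.range (text.toList.length - 9)).map
      (fun (k : Nat) =>
        (PySem.Str.slice text (some (k : Int)) (some ((k : Int) + 10)), (k : Int)))).foldl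
      (fun d p => d.modify p.1 [] (fun l => l ++ [p.2])) PySem.Dict.empty).keys
      = PySem.Set.ofList (((List.range (text.toList.length - 9)).map
          (fun (k : Nat) =>
            (PySem.Str.slice text (some (k : Int)) (some ((k : Int) + 10)), (k : Int)))).map
          (fun p => p.1)) := by
    have h := PySem.Dict.keys_foldl_modify_key
      (l := (List.range (text.toList.length - 9)).map
        (fun (k : Nat) =>
          (PySem.Str.slice text (some (k : Int)) (some ((k : Int) + 10)), (k : Int))))
      (key := fun (p : String × Int) => p.1) (d0 := ([] : List Int))
      (f := fun (d : PySem.Dict String (List Int)) (p : String × Int) => fun l => l ++ [p.2])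
      (d := PySem.Dict.empty)
    exact h
  constructor
  · rintro ⟨g, hg, hpred⟩
    rw [hkeys, PySem.Set.mem_ofList, List.map_map, List.mem_map] at hg
    obtain ⟨j, hj, rfl⟩ := hg
    rw [List.mem_range] at hj
    refine ⟨j, hj, ?_⟩
    simp only [Function.comp_apply, decide_eq_true_eq] at hpred
    rw [PySem.Dict.getD_foldl_modify_append, PySem.Dict.getD_empty, List.nil_append,
      List.filter_map, List.map_map] at hpred
    simp only [Function.comp_def] at hpred
    rw [pvNatpos_eq text h100 j hj] at hpred
    rw [show (fun (k : Nat) => ((k : Int))) = Int.ofNat from rfl, pvGreedy_natlist] at hpred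
    exact_mod_cast hpred
  · rintro ⟨j, hj, hlt⟩
    refine ⟨PySem.Str.slice text (some (j : Int)) (some ((j : Int) + 10)), ?_, ?_⟩
    · rw [hkeys, PySem.Set.mem_ofList, List.map_map, List.mem_map]
      exact ⟨j, by simpa using hj, rfl⟩
    · simp only [Function.comp_apply, decide_eq_true_eq]
      rw [PySem.Dict.getD_foldl_modify_append, PySem.Dict.getD_empty, List.nil_append,
        List.filter_map, List.map_map]
      simp only [Function.comp_def]
      rw [pvNatpos_eq text h100 j hj]
      rw [show (fun (k : Nat) => ((k : Int))) = Int.ofNat from rfl, pvGreedy_natlist]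
      exact_mod_cast hlt

theorem pvCount_eq_auxN (text : String) (j : Nat) (hj : j ≤ text.toList.length - 10)
    (h100 : 100 ≤ text.toList.length) :
    PySem.Chars.count text.toList ((text.toList.drop j).take 10)
      = pvAux 10 0 (pvMpos text.toList ((text.toList.drop j).take 10)) := by
  have hglen : ((text.toList.drop j).take 10).length = 10 := by
    simp only [List.length_take, List.length_drop]
    omega
  have hne : (text.toList.drop j).take 10 ≠ [] := by
    intro h
    rw [h] at hglen
    simp at hglen
  rw [pvCount_eq_cnt _ _ hne,
    ← pvCnt_eq_aux _ hne text.toList.length text.toList (Nat.le_refl _), hglen]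

theorem pvFinal (text : String) : has_repetitive_pattern_py text = has_repetitive_pattern_py_alt text := by
  by_cases h100 : 100 ≤ text.toList.length
  · rw [Bool.eq_iff_iff, pvA_char text h100, pvB_char text h100]
    constructor
    · rintro ⟨j, hj, hc⟩
      refine ⟨j, by omega, ?_⟩
      rw [← pvCount_eq_auxN text j (by omega) h100]
      exact hc
    · rintro ⟨j, hj, hc⟩
      rw [← pvCount_eq_auxN text j (by omega) h100] at hc
      by_cases hlt : j < text.toList.length - 10
      · exact ⟨j, hlt, hc⟩
      · -- j = length - 10: the pattern occurs > 50 times, so it also occurs at an earlier start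
        have hje : j = text.toList.length - 10 := by omega
        subst hje
        set g := (text.toList.drop (text.toList.length - 10)).take 10 with hg
        have hglen : g.length = 10 := by
          rw [hg]
          simp only [List.length_take, List.length_drop]
          omega
        have hne : g ≠ [] := by
          intro h
          rw [h] at hglen
          simp at hglen
        have haux : 50 < pvAux 10 0 (pvMpos text.toList g) := by
          rw [pvCount_eq_auxN text _ (Nat.le_refl _) h100] at hc
          exact hc
        have hlen : 50 < (pvMpos text.toList g).length :=
          lt_of_lt_of_le haux (pvAux_le_length 10 _ 0)
        have hnd : (pvMpos text.toList g).Nodup := List.Nodup.filter _ List.nodup_range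
        have hbound : ∀ i ∈ pvMpos text.toList g, i ≤ text.toList.length - 10 := by
          intro i hi
          unfold pvMpos at hi
          have h1 := List.mem_of_mem_filter hi
          have h2 := List.of_mem_filter hi
          rw [List.mem_range] at h1
          have hpre : g <+: text.toList.drop i := by simpa using h2
          have := hpre.length_le
          simp only [List.length_drop] at this
          omega
        have hex : ∃ i ∈ pvMpos text.toList g, i < text.toList.length - 10 := by
          by_contra hno
          have hno' : ∀ i ∈ pvMpos text.toList g, ¬ i < text.toList.length - 10 :=
            fun i hi hlt' => hno ⟨i, hi, hlt'⟩
          have hall : ∀ i ∈ pvMpos text.toList g, i = text.toList.length - 10 := by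
            intro i hi
            have := hbound i hi
            have := hno' i hi
            omega
          match hm : pvMpos text.toList g, hlen, hnd with
          | a :: b :: t, _, hnd' => ?_
          rw [hm] at hall
          have ha := hall a (by simp)
          have hb := hall b (by simp)
          rw [hm] at hnd
          simp [List.nodup_cons] at hnd
          exact hnd.1.1 (by omega)
        obtain ⟨i₀, hi₀m, hi₀⟩ := hex
        have hpre : g <+: text.toList.drop i₀ := by
          have h2 := List.of_mem_filter hi₀m
          simpa using h2
        have hgram : (text.toList.drop i₀).take 10 = g := by
          have := List.prefix_iff_eq_take.mp hpre
          rw [← hglen]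
          exact this.symm
        refine ⟨i₀, hi₀, ?_⟩
        rw [hgram]
        exact hc
  · unfold has_repetitive_pattern_py has_repetitive_pattern_py_alt
    rw [PySem.Str.len_eq, if_pos (by omega), if_pos (by omega)]

-- ===== VERDICT (by name: the statement is the Claim_ definition above) =====
theorem has_repetitive_pattern_py_spec : Claim_equal_has_repetitive_pattern_py := by
  unfold Claim_equal_has_repetitive_pattern_py Spec_has_repetitive_pattern_py
  intro text _
  exact pvFinal text
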